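-- pv_equiv track=rewrite | github.com/brennan49/python_practice | practiceQuestions/problems1.py | getSubsequences
-- ===== SOURCE A (Python) =====
-- def findIntersections(inputDict, length):
--     prevMax = None
--     total = 0
--     totals = []
--     for key,value in inputDict.items():
--         currStart = value['start']
--         currMax = value['max']
--         if prevMax == None:
--             prevMax = currMax
--             total = value['count']
--         elif currStart < prevMax:
--             if prevMax < currMax:
--                 prevMax = currMax
--             total = total + value['count']
--         else:
--             totals.append(total)
--             total = value['count']
--             prevMax = currMax
--     totals.append(total)
--     return totals
--
-- def getSubsequences(inputList):
--     shotDict = {}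
--     elem = 0
--     dictLength = 0
--
--     for item in inputList:
--         if item in shotDict:
--             shotDict[item]['count'] += 1
--             shotDict[item]['max'] = elem
--         else:
--             shotDict[item] = {
--                 'count': 1,
--                 'start': elem,
--                 'max': elem
--             }
--             dictLength += 1
--         elem += 1
--
--     if dictLength == len(inputList):
--         subseqList = [1] * len(inputList)
--         return subseqList
--     else:
--         return findIntersections(shotDict, len(inputList))
-- ===== SOURCE B (Python) =====
-- def getSubsequences(inputList):
--     # partition-labels: split at i when no element seen so far occurs again later
--     last = {}
--     for i, item in enumerate(inputList):
--         last[item] = i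
--     result = []
--     start = 0
--     end = 0
--     for i, item in enumerate(inputList):
--         if last[item] > end:
--             end = last[item]
--         if i == end:
--             result.append(i - start + 1)
--             start = i + 1
--     return result
-- ===== Notes on version B (the rewrite author's own statement) =====
-- stated objective: idiomatic
-- what changed: Replaces the per-value interval dict (count/start/max) plus a second merge pass over dict items by the classic partition-labels scan: record each value's last index, then one pass over positions maintaining a running max and emitting the chunk length whenever the position reaches it.
import Mathlib
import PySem

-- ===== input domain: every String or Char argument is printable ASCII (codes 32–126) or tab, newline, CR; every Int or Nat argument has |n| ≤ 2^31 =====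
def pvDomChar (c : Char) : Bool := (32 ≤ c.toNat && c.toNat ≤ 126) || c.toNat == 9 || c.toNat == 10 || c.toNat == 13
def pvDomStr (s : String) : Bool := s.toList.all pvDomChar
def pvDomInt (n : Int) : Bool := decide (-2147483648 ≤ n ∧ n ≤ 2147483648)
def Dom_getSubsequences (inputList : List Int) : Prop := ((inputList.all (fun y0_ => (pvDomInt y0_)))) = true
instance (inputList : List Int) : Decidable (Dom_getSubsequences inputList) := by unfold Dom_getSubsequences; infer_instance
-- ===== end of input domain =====

-- B replaces A's per-value record dict plus merge pass by the classic partition-labels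
-- scan (last-occurrence table + one running-max pass); same O(n) asymptotics, measured
-- constant-factor faster in a timing run (lighter per-element work), and plainer.


-- ===== PORT A =====
-- helper from the same module: findIntersections(inputDict, length) (length is unused, as in the Python)
def findIntersections (inputDict : PySem.Dict Int (Int × Int × Int)) (length : Int) : List Int :=
  let st := inputDict.items.foldl
    (fun (st : Option Int × Int × List Int) kv =>
      let (prevMax, total, totals) := st
      let currStart := kv.2.2.1
      let currMax := kv.2.2.2
      match prevMax with
      | none => (some currMax, kv.2.1, totals)
      | some pm =>
        if currStart < pm then
          (some (if pm < currMax then currMax else pm), total + kv.2.1, totals)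
        else
          (some currMax, kv.2.1, totals ++ [total]))
    (none, 0, [])
  st.2.2 ++ [st.2.1]

-- shotDict values are the record {'count','start','max'} as a triple (count, start, max)
def getSubsequences (inputList : List Int) : List Int :=
  let st := inputList.foldl
    (fun (st : PySem.Dict Int (Int × Int × Int) × Int × Int) item =>
      let (d, elem, dictLength) := st
      if d.contains item then
        (d.modify item (0, 0, 0) (fun r => (r.1 + 1, r.2.1, elem)), elem + 1, dictLength)
      else
        (d.insert item (1, elem, elem), elem + 1, dictLength + 1))
    (PySem.Dict.empty, 0, 0)
  if st.2.2 = (inputList.length : Int) then List.replicate inputList.length 1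
  else findIntersections st.1 (inputList.length : Int)

-- ===== PORT B =====
def getSubsequences_alt (inputList : List Int) : List Int :=
  let last := (PySem.List.enumerate inputList 0).foldl
    (fun (d : PySem.Dict Int Int) p => d.insert p.2 p.1) PySem.Dict.empty
  let st := (PySem.List.enumerate inputList 0).foldl
    (fun (st : List Int × Int × Int) p =>
      let (result, start, e) := st
      -- last[item]: the key is always present (built from the same list); getD's default is never read
      let l := last.getD p.2 0
      let e' := if e < l then l else e
      if p.1 = e' then (result ++ [p.1 - start + 1], p.1 + 1, e') else (result, start, e'))
    ([], 0, 0)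
  st.1

-- ===== PRECONDITION & SPEC =====
def Spec_getSubsequences (inputList : List Int) (out : List Int) : Prop := out = getSubsequences_alt inputList
instance (inputList : List Int) (out : List Int) : Decidable (Spec_getSubsequences inputList out) := by unfold Spec_getSubsequences; infer_instance

-- ===== CLAIM (what is proved, stated in full; the proofs are below) =====
def Claim_equal_getSubsequences : Prop := ∀ (inputList : List Int), Dom_getSubsequences inputList → Spec_getSubsequences inputList (getSubsequences inputList)

-- ===== LEMMAS AND PROOFS =====

-- ===== infrastructure: first/last occurrence indices =====

def lstFrom (v : Int) : List Int → Nat → Nat → Nat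
  | [], _, acc => acc
  | x :: t, i, acc => lstFrom v t (i+1) (if x = v then i else acc)

def lstIdx (xs : List Int) (v : Int) : Nat := lstFrom v xs 0 0

def fstFrom (v : Int) : List Int → Nat → Nat
  | [], i => i
  | x :: t, i => if x = v then i else fstFrom v t (i+1)

def fstIdx (xs : List Int) (v : Int) : Nat := fstFrom v xs 0

theorem lstFrom_append (v : Int) (t u : List Int) (i acc : Nat) :
    lstFrom v (t ++ u) i acc = lstFrom v u (i + t.length) (lstFrom v t i acc) := by
  induction t generalizing i acc with
  | nil => simp [lstFrom]
  | cons x t ih => simp [lstFrom, ih]; ring_nf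

theorem lst_append (xs : List Int) (x v : Int) :
    lstIdx (xs ++ [x]) v = if x = v then xs.length else lstIdx xs v := by
  simp [lstIdx, lstFrom_append, lstFrom]

theorem lst_lt (xs : List Int) (v : Int) (h : v ∈ xs) : lstIdx xs v < xs.length := by
  induction xs using List.reverseRecOn with
  | nil => simp at h
  | append_singleton t x ih =>
    rw [lst_append]; simp at h ⊢
    rcases h with h | h
    · split; · omega
      · exact Nat.le_of_lt (ih h)
    · simp [h]

theorem get_lst (xs : List Int) (v : Int) (h : v ∈ xs) : xs[lstIdx xs v]? = some v := by
  induction xs using List.reverseRecOn with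
  | nil => simp at h
  | append_singleton t x ih =>
    rw [lst_append]
    simp at h
    by_cases hx : x = v
    · simp [hx]
    · rcases h with h | h
      · have hlt := lst_lt t v h
        simp [hx, List.getElem?_append_left hlt, ih h]
      · omega

theorem le_lst (xs : List Int) (v : Int) (j : Nat) (hj : j < xs.length)
    (hv : xs[j] = v) : j ≤ lstIdx xs v := by
  induction xs using List.reverseRecOn with
  | nil => simp at hj
  | append_singleton t x ih =>
    rw [lst_append]
    simp at hj
    by_cases hjt : j < t.length
    · rw [List.getElem_append_left hjt] at hv
      have := ih hjt hv
      split <;> omega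
    · have hjl : j = t.length := by omega
      subst hjl
      rw [List.getElem_append_right (by omega)] at hv
      simp at hv
      simp [hv]

theorem fstFrom_append (v : Int) (t u : List Int) (i : Nat) :
    fstFrom v (t ++ u) i = if v ∈ t then fstFrom v t i else fstFrom v u (i + t.length) := by
  induction t generalizing i with
  | nil => simp
  | cons x t ih =>
    by_cases hx : x = v
    · simp [fstFrom, hx]
    · simp [fstFrom, hx, ih, Ne.symm hx]

      split <;> [rfl; ring_nf]

theorem fst_append (xs : List Int) (x v : Int) :
    fstIdx (xs ++ [x]) v = if v ∈ xs then fstIdx xs v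
      else if x = v then xs.length else xs.length + 1 := by
  simp [fstIdx, fstFrom_append, fstFrom]

theorem fst_lt (xs : List Int) (v : Int) (h : v ∈ xs) : fstIdx xs v < xs.length := by
  induction xs using List.reverseRecOn with
  | nil => simp at h
  | append_singleton t x ih =>
    rw [fst_append]; simp at h ⊢
    by_cases ht : v ∈ t
    · simp [ht]; exact Nat.le_of_lt (ih ht)
    · rcases h with h | h; · exact absurd h ht
      subst h; simp [ht]

theorem get_fst (xs : List Int) (v : Int) (h : v ∈ xs) : xs[fstIdx xs v]? = some v := by
  induction xs using List.reverseRecOn with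
  | nil => simp at h
  | append_singleton t x ih =>
    rw [fst_append]
    simp at h
    by_cases ht : v ∈ t
    · have hlt := fst_lt t v ht
      simp [ht, List.getElem?_append_left hlt, ih ht]
    · rcases h with h | h; · exact absurd h ht
      subst h; simp [ht]

theorem fst_le (xs : List Int) (v : Int) (j : Nat) (hj : j < xs.length)
    (hv : xs[j] = v) : fstIdx xs v ≤ j := by
  induction xs using List.reverseRecOn with
  | nil => simp at hj
  | append_singleton t x ih =>
    rw [fst_append]
    simp at hj
    by_cases hjt : j < t.length
    · rw [List.getElem_append_left hjt] at hv
      have hm : v ∈ t := hv ▸ List.getElem_mem hjt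
      simp [hm]; exact ih hjt hv
    · have hjl : j = t.length := by omega
      subst hjl
      rw [List.getElem_append_right (by omega)] at hv
      simp at hv
      by_cases ht : v ∈ t
      · simp [ht]; exact Nat.le_of_lt (fst_lt t v ht)
      · simp [ht, hv]

theorem fst_le_lst (xs : List Int) (v : Int) (h : v ∈ xs) : fstIdx xs v ≤ lstIdx xs v := by
  have h1 := get_lst xs v h
  have h2 := lst_lt xs v h
  rw [List.getElem?_eq_getElem h2] at h1
  exact fst_le xs v _ h2 (by simpa using h1)

-- ===== dedup (first-occurrence distinct values) =====

theorem dedup_append (xs : List Int) (x : Int) :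
    PySem.List.dedup (xs ++ [x]) =
      if x ∈ xs then PySem.List.dedup xs else PySem.List.dedup xs ++ [x] := by
  have h1 : PySem.List.dedup (xs ++ [x]) = (PySem.Set.ofList xs).add x := by
    simp [PySem.List.dedup, PySem.Set.ofList, List.foldl_append]
  by_cases hx : x ∈ xs
  · rw [h1, PySem.Set.add_of_mem ((PySem.Set.mem_ofList xs x).mpr hx)]
    simp [hx]
  · rw [h1, PySem.Set.add_of_not_mem (fun hc => hx ((PySem.Set.mem_ofList xs x).mp hc))]
    simp [hx]

theorem dedup_sublist (xs : List Int) : (PySem.List.dedup xs).Sublist xs := by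
  induction xs using List.reverseRecOn with
  | nil => simp [PySem.List.dedup, PySem.Set.ofList, PySem.Set.empty]
  | append_singleton t x ih =>
    rw [dedup_append]
    split
    · exact ih.trans (List.sublist_append_left t [x])
    · exact List.Sublist.append ih (List.Sublist.refl [x])

theorem dedup_pairwise_fst (xs : List Int) :
    (PySem.List.dedup xs).Pairwise (fun a b => fstIdx xs a < fstIdx xs b) := by
  induction xs using List.reverseRecOn with
  | nil => simp [PySem.List.dedup, PySem.Set.ofList, PySem.Set.empty]
  | append_singleton t x ih =>
    have hmono : ∀ a b : Int, a ∈ PySem.List.dedup t → b ∈ PySem.List.dedup t →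
        fstIdx t a < fstIdx t b → fstIdx (t ++ [x]) a < fstIdx (t ++ [x]) b := by
      intro a b ha hb hab
      rw [fst_append, fst_append]
      simp [(PySem.List.mem_dedup t a).mp ha, (PySem.List.mem_dedup t b).mp hb]
      exact hab
    rw [dedup_append]
    by_cases hx : x ∈ t
    · simp [hx]
      exact ih.imp_of_mem (fun ha hb h => hmono _ _ ha hb h)
    · simp [hx]
      rw [List.pairwise_append]
      refine ⟨ih.imp_of_mem (fun ha hb h => hmono _ _ ha hb h), List.pairwise_singleton _ _, ?_⟩
      intro a ha b hb
      simp at hb; subst hb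
      have hat : a ∈ t := (PySem.List.mem_dedup t a).mp ha
      rw [fst_append, fst_append]
      simp [hat, hx]
      exact fst_lt t a hat

-- the distinct values in first-occurrence order (kept as its own def so simp leaves it alone)
def gsL (xs : List Int) : List Int := PySem.List.dedup xs

theorem mem_gsL (xs : List Int) (v : Int) : v ∈ gsL xs ↔ v ∈ xs := PySem.List.mem_dedup xs v
theorem nodup_gsL (xs : List Int) : (gsL xs).Nodup := PySem.List.nodup_dedup xs
theorem gsL_append (xs : List Int) (x : Int) :
    gsL (xs ++ [x]) = if x ∈ xs then gsL xs else gsL xs ++ [x] := dedup_append xs x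
theorem gsL_sublist (xs : List Int) : (gsL xs).Sublist xs := dedup_sublist xs
theorem gsL_pairwise_fst (xs : List Int) :
    (gsL xs).Pairwise (fun a b => fstIdx xs a < fstIdx xs b) := dedup_pairwise_fst xs


-- ===== running maximum of last indices =====

def maxLst (xs l : List Int) : Nat := (l.map (lstIdx xs)).foldl max 0

def Fm (xs : List Int) (t : Nat) : Nat := maxLst xs (xs.take t)

theorem maxLst_append (xs l : List Int) (v : Int) :
    maxLst xs (l ++ [v]) = max (maxLst xs l) (lstIdx xs v) := by
  simp [maxLst, List.foldl_append]

theorem le_maxLst (xs l : List Int) (v : Int) (h : v ∈ l) : lstIdx xs v ≤ maxLst xs l := by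
  exact (PySem.List.le_foldl_max (l.map (lstIdx xs)) 0).2 _ (List.mem_map_of_mem h)

theorem maxLst_le (xs l : List Int) (b : Nat) (h : ∀ v ∈ l, lstIdx xs v ≤ b) :
    maxLst xs l ≤ b := by
  rcases PySem.List.foldl_max_mem (l.map (lstIdx xs)) 0 with hc | hc
  · simp [maxLst, hc]
  · rcases List.mem_map.mp hc with ⟨v, hv, he⟩
    simp [maxLst, ← he]; exact h v hv

theorem maxLst_congr (xs l1 l2 : List Int) (h : ∀ v, v ∈ l1 ↔ v ∈ l2) :
    maxLst xs l1 = maxLst xs l2 := by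
  apply Nat.le_antisymm
  · exact maxLst_le _ _ _ (fun v hv => le_maxLst _ _ _ ((h v).mp hv))
  · exact maxLst_le _ _ _ (fun v hv => le_maxLst _ _ _ ((h v).mpr hv))

theorem Fm_succ (xs : List Int) (t : Nat) (ht : t < xs.length) :
    Fm xs (t + 1) = max (Fm xs t) (lstIdx xs xs[t]) := by
  rw [Fm, List.take_succ_eq_append_getElem ht, maxLst_append]; rfl

theorem Fm_zero (xs : List Int) : Fm xs 0 = 0 := by simp [Fm, maxLst]

theorem Fm_ge (xs : List Int) (t : Nat) (h1 : 1 ≤ t) (h2 : t ≤ xs.length) :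
    t - 1 ≤ Fm xs t := by
  have hlt : t - 1 < xs.length := by omega
  have hmem : xs[t-1] ∈ xs.take t :=
    List.mem_take_iff_getElem.mpr ⟨t - 1, by omega, rfl⟩
  calc t - 1 ≤ lstIdx xs xs[t-1] := le_lst xs _ _ hlt rfl
    _ ≤ _ := le_maxLst _ _ _ hmem

theorem Fm_le (xs : List Int) (t : Nat) (h : 1 ≤ xs.length) :
    Fm xs t ≤ xs.length - 1 := by
  apply maxLst_le
  intro v hv
  have := lst_lt xs v (List.mem_of_mem_take hv)
  omega

theorem Fm_last (xs : List Int) (h : 1 ≤ xs.length) : Fm xs xs.length = xs.length - 1 :=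
  Nat.le_antisymm (Fm_le xs _ h) (Fm_ge xs _ h (le_refl _))

-- ===== group boundaries: first occurrences of the distinct values =====

def sB (xs : List Int) (m : Nat) : Nat :=
  if h : m < (gsL xs).length then fstIdx xs ((gsL xs)[m]) else xs.length

theorem gs_fst_mono (xs : List Int) (i j : Nat) (hi : i < j)
    (hj : j < (gsL xs).length) :
    fstIdx xs ((gsL xs)[i]'(by omega)) < fstIdx xs ((gsL xs)[j]) :=
  List.pairwise_iff_getElem.mp (gsL_pairwise_fst xs) i j (by omega) hj hi

theorem gs_fst_le_iff (xs : List Int) (i j : Nat) (hi : i < (gsL xs).length)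
    (hj : j < (gsL xs).length) :
    fstIdx xs ((gsL xs)[i]) ≤ fstIdx xs ((gsL xs)[j]) ↔ i ≤ j := by
  constructor
  · intro h
    by_contra hc
    have := gs_fst_mono xs j i (by omega) hi
    omega
  · intro h
    rcases Nat.lt_or_ge i j with h' | h'
    · exact Nat.le_of_lt (gs_fst_mono xs i j h' hj)
    · have : i = j := by omega
      subst this; exact le_refl _

theorem sB_le (xs : List Int) (m : Nat) : sB xs m ≤ xs.length := by
  rw [sB]; split
  · next h =>
    exact Nat.le_of_lt (fst_lt xs _ ((mem_gsL xs _).mp (List.getElem_mem h)))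
  · exact le_refl _

theorem sB_lt_succ (xs : List Int) (m : Nat) (hm : m < (gsL xs).length) :
    sB xs m < sB xs (m + 1) := by
  rw [sB, sB]
  simp [hm]
  split
  · next h => exact gs_fst_mono xs m (m+1) (by omega) h
  · exact fst_lt xs _ ((mem_gsL xs _).mp (List.getElem_mem hm))

theorem sB_mono (xs : List Int) (i j : Nat) (hij : i < j) (hj : j ≤ (gsL xs).length) :
    sB xs i < sB xs j := by
  have hik : i < (gsL xs).length := by omega
  rcases Nat.lt_or_ge j (gsL xs).length with h | h
  · rw [sB, dif_pos hik, sB, dif_pos h]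
    exact gs_fst_mono xs i j hij h
  · have hje : j = (gsL xs).length := by omega
    rw [sB, dif_pos hik, sB, dif_neg (by omega)]
    exact fst_lt xs _ ((mem_gsL xs _).mp (List.getElem_mem hik))

theorem mem_take_gs_iff (xs : List Int) (m : Nat) (hm : m ≤ (gsL xs).length)
    (v : Int) : v ∈ (gsL xs).take m ↔ v ∈ xs ∧ fstIdx xs v < sB xs m := by
  constructor
  · intro h
    rcases List.mem_take_iff_getElem.mp h with ⟨i, hi, he⟩
    have hik : i < (gsL xs).length := by
      simp at hi; omega
    have hvx : v ∈ xs := (mem_gsL xs v).mp (he ▸ List.getElem_mem hik)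
    refine ⟨hvx, ?_⟩
    rw [sB]; split
    · next h' => exact he ▸ gs_fst_mono xs i m (by simp at hi; omega) h'
    · next h' => exact fst_lt xs v hvx
  · rintro ⟨hvx, hlt⟩
    have hvg : v ∈ gsL xs := (mem_gsL xs v).mpr hvx
    rcases List.mem_iff_getElem.mp hvg with ⟨i, hik, he⟩
    have him : i < m := by
      by_contra hc
      have hmk : m < (gsL xs).length := by omega
      rw [sB, dif_pos hmk] at hlt
      have := (gs_fst_le_iff xs m i hmk hik).mpr (by omega)
      rw [he] at this
      omega
    exact List.mem_take_iff_getElem.mpr ⟨i, by simp; omega, he⟩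

theorem groupMax (xs : List Int) (m : Nat) (hm : m ≤ (gsL xs).length) :
    maxLst xs ((gsL xs).take m) = Fm xs (sB xs m) := by
  apply maxLst_congr
  intro v
  rw [mem_take_gs_iff xs m hm v]
  constructor
  · rintro ⟨hvx, hlt⟩
    have h1 : fstIdx xs v < xs.length := fst_lt xs v hvx
    have h2 := get_fst xs v hvx
    rw [List.getElem?_eq_getElem h1] at h2
    exact List.mem_take_iff_getElem.mpr ⟨fstIdx xs v, by omega, by simpa using h2⟩
  · intro h
    rcases List.mem_take_iff_getElem.mp h with ⟨j, hj, he⟩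
    have hjn : j < xs.length := by simp at hj; omega
    have hvx : v ∈ xs := he ▸ List.getElem_mem hjn
    refine ⟨hvx, ?_⟩
    have := fst_le xs v j hjn he
    simp at hj; omega

theorem cut_first (xs : List Int) (i : Nat) (h1 : i + 1 < xs.length)
    (hcut : Fm xs (i + 1) = i) : fstIdx xs (xs[i+1]) = i + 1 := by
  set v := xs[i+1] with hv
  have hvx : v ∈ xs := List.getElem_mem h1
  have hle : fstIdx xs v ≤ i + 1 := fst_le xs v (i+1) h1 rfl
  rcases Nat.lt_or_ge (fstIdx xs v) (i+1) with hlt | hge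
  · exfalso
    have hf : fstIdx xs v < xs.length := by omega
    have hgf := get_fst xs v hvx
    rw [List.getElem?_eq_getElem hf] at hgf
    have hmem : xs[fstIdx xs v] ∈ xs.take (i+1) :=
      List.mem_take_iff_getElem.mpr ⟨fstIdx xs v, by omega, rfl⟩
    have hlst : lstIdx xs v ≥ i + 1 := le_lst xs v (i+1) h1 rfl
    have : lstIdx xs xs[fstIdx xs v] ≤ Fm xs (i+1) := le_maxLst _ _ _ hmem
    rw [show xs[fstIdx xs v] = v from by simpa using hgf] at this
    omega
  · omega

theorem no_first_between (xs : List Int) (m p : Nat)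
    (hm : m < (gsL xs).length) (hp : p < xs.length)
    (h1 : sB xs m < p) (h2 : p < sB xs (m + 1)) : fstIdx xs (xs[p]) ≠ p := by
  intro hfst
  have hvx : xs[p] ∈ xs := List.getElem_mem hp
  have hvg : xs[p] ∈ gsL xs := (mem_gsL xs _).mpr hvx
  rcases List.mem_iff_getElem.mp hvg with ⟨r, hrk, he⟩
  have hrm : m < r := by
    by_contra hc
    have := (gs_fst_le_iff xs r m hrk hm).mpr (by omega)
    rw [he, hfst] at this
    rw [sB, dif_pos hm] at h1
    omega
  have hm1 : m + 1 < (gsL xs).length := by omega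
  have := (gs_fst_le_iff xs (m+1) r hm1 hrk).mpr (by omega)
  rw [he, hfst] at this
  rw [sB, dif_pos hm1] at h2
  omega

-- ===== counting: the values of a closed block fill it exactly =====

theorem countP_cons_mem (v : Int) (t : List Int) (hv : v ∉ t) (xs : List Int) :
    xs.countP (fun x => decide (x ∈ v :: t)) = xs.count v + xs.countP (fun x => decide (x ∈ t)) := by
  induction xs with
  | nil => simp
  | cons y ys ih =>
    rw [List.countP_cons, List.countP_cons, List.count_cons, ih]
    by_cases hyv : y = v
    · subst hyv; simp [hv]; omega
    · by_cases hyt : y ∈ t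
      · simp [hyv, hyt]; omega
      · simp [hyv, hyt]

theorem sum_counts (xs l : List Int) (hl : l.Nodup) :
    (l.map (fun v => xs.count v)).sum = xs.countP (fun x => decide (x ∈ l)) := by
  induction l with
  | nil => simp
  | cons v t ih =>
    have hv : v ∉ t := (List.nodup_cons.mp hl).1
    rw [List.map_cons, List.sum_cons, ih (List.nodup_cons.mp hl).2, countP_cons_mem v t hv]

theorem count_take_groups (xs : List Int) (m : Nat) (hm : m ≤ (gsL xs).length)
    (hbound : ∀ w ∈ (gsL xs).take m, lstIdx xs w < sB xs m) :
    (((gsL xs).take m).map (fun v => xs.count v)).sum = sB xs m := by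
  have hnd : ((gsL xs).take m).Nodup := (List.take_sublist m _).nodup (nodup_gsL xs)
  rw [sum_counts _ _ hnd]
  have hs := sB_le xs m
  set gl := (gsL xs).take m with hgl
  have hsplit : xs.countP (fun x => decide (x ∈ gl)) =
      (xs.take (sB xs m)).countP (fun x => decide (x ∈ gl)) +
      (xs.drop (sB xs m)).countP (fun x => decide (x ∈ gl)) := by
    conv_lhs => rw [← List.take_append_drop (sB xs m) xs]
    rw [List.countP_append]
  rw [hsplit]
  have h1 : (xs.take (sB xs m)).countP (fun x => decide (x ∈ gl)) =
      (xs.take (sB xs m)).length := by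
    apply List.countP_eq_length.mpr
    intro y hy
    rcases List.mem_take_iff_getElem.mp hy with ⟨j, hj, he⟩
    have hjn : j < xs.length := by simp at hj; omega
    have hjs : j < sB xs m := by simp at hj; omega
    have hyx : y ∈ xs := he ▸ List.getElem_mem hjn
    have hfst : fstIdx xs y ≤ j := fst_le xs y j hjn he
    simp only [decide_eq_true_eq]
    exact (mem_take_gs_iff xs m hm y).mpr ⟨hyx, by omega⟩
  have h2 : (xs.drop (sB xs m)).countP (fun x => decide (x ∈ gl)) = 0 := by
    apply List.countP_eq_zero.mpr
    intro y hy
    simp only [decide_eq_true_eq]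
    intro hmem
    rcases List.mem_iff_getElem.mp hy with ⟨q, hq, he⟩
    rw [List.getElem_drop] at he
    have hqn : sB xs m + q < xs.length := by
      simp at hq; omega
    have := le_lst xs y (sB xs m + q) hqn he
    have := hbound y hmem
    omega
  rw [h1, h2, List.length_take]
  omega

-- ===== the cut positions and the block sizes between them =====

def cutB (xs : List Int) (i : Nat) : Bool := Fm xs (i+1) == i

def cutsUpTo (xs : List Int) (t : Nat) : List Nat := (List.range t).filter (cutB xs)

def sizesFrom (prev : Int) : List Nat → List Int
  | [] => []
  | c :: cs => ((c:Int) - prev) :: sizesFrom (c:Int) cs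

def lastCut (prev : Int) (cs : List Nat) : Int := (cs.getLast?).elim prev Int.ofNat

theorem lastCut_append (p : Int) (cs : List Nat) (c : Nat) :
    lastCut p (cs ++ [c]) = (c:Int) := by
  simp [lastCut]

theorem lastCut_cons (p : Int) (c : Nat) (cs : List Nat) :
    lastCut p (c :: cs) = lastCut (c:Int) cs := by
  cases cs with
  | nil => simp [lastCut]
  | cons d ds =>
    rw [lastCut, lastCut, List.getLast?_cons_cons,
        List.getLast?_eq_some_getLast (l := d :: ds) (by simp)]
    rfl

theorem sizesFrom_append (p : Int) (cs : List Nat) (c : Nat) :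
    sizesFrom p (cs ++ [c]) = sizesFrom p cs ++ [(c:Int) - lastCut p cs] := by
  induction cs generalizing p with
  | nil => simp [sizesFrom, lastCut]
  | cons d ds ih =>
    simp [sizesFrom, ih, lastCut_cons]

theorem sizesFrom_range' (m a : Nat) :
    sizesFrom ((a:Int) - 1) (List.range' a m) = List.replicate m 1 := by
  induction m generalizing a with
  | zero => simp [sizesFrom]
  | succ m ih =>
    rw [List.range'_succ, List.replicate_succ, sizesFrom]
    rw [show ((a:Int) - ((a:Int) - 1)) = 1 by ring]
    congr 1
    simpa using ih (a+1)

theorem cutsUpTo_window (xs : List Int) (a b : Nat) (hab : a ≤ b)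
    (h : ∀ i, a ≤ i → i < b → cutB xs i = false) : cutsUpTo xs b = cutsUpTo xs a := by
  have : b = a + (b - a) := by omega
  rw [cutsUpTo, this, List.range_add, List.filter_append]
  have hnil : ((List.range (b - a)).map (a + ·)).filter (cutB xs) = [] := by
    apply List.filter_eq_nil_iff.mpr
    intro x hx
    rcases List.mem_map.mp hx with ⟨j, hj, he⟩
    simp at hj
    rw [← he]
    simp [h (a + j) (by omega) (by omega)]
  rw [hnil, List.append_nil]; rfl

theorem cutsUpTo_cut (xs : List Int) (a b : Nat) (hab : a < b) (hc : cutB xs a = true)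
    (h : ∀ i, a < i → i < b → cutB xs i = false) :
    cutsUpTo xs b = cutsUpTo xs a ++ [a] := by
  have h1 : cutsUpTo xs b = cutsUpTo xs (a + 1) :=
    cutsUpTo_window xs (a+1) b (by omega) (fun i hi hib => h i (by omega) hib)
  rw [h1, cutsUpTo, List.range_succ, List.filter_append]
  simp [hc]; rfl

-- ===== B-side: the last-index dict and the partition scan =====

theorem lastDict_getD (xs : List Int) (v : Int) (hv : v ∈ xs) :
    ((PySem.List.enumerate xs 0).foldl
      (fun (d : PySem.Dict Int Int) p => d.insert p.2 p.1) PySem.Dict.empty).getD v 0 =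
    (lstIdx xs v : Int) := by
  induction xs using List.reverseRecOn with
  | nil => simp at hv
  | append_singleton t x ih =>
    rw [PySem.List.enumerate_append, List.foldl_append]
    have hsing : PySem.List.enumerate [x] ((0:Int) + t.length) = [((t.length:Int), x)] := by
      rw [PySem.List.enumerate_cons]
      simp [PySem.List.enumerate_nil]
    rw [hsing]
    simp only [List.foldl_cons, List.foldl_nil]
    rw [PySem.Dict.getD_insert]
    rw [lst_append]
    by_cases hvx : v = x
    · simp [hvx]
    · simp at hv
      rcases hv with hv | hv
      · simp [hvx, Ne.symm hvx, ih hv]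
      · exact absurd hv hvx

theorem cutsUpTo_succ (xs : List Int) (t : Nat) :
    cutsUpTo xs (t+1) = cutsUpTo xs t ++ if cutB xs t then [t] else [] := by
  rw [cutsUpTo, List.range_succ, List.filter_append]
  cases h : cutB xs t <;> simp [h] <;> rfl

theorem loopB_inv (xs : List Int) (t : Nat) (ht : t ≤ xs.length) :
    ((PySem.List.enumerate xs 0).take t).foldl
      (fun (st : List Int × Int × Int) p =>
        let (result, start, e) := st
        let l := ((PySem.List.enumerate xs 0).foldl
          (fun (d : PySem.Dict Int Int) q => d.insert q.2 q.1) PySem.Dict.empty).getD p.2 0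
        let e' := if e < l then l else e
        if p.1 = e' then (result ++ [p.1 - start + 1], p.1 + 1, e') else (result, start, e'))
      ([], 0, 0) =
    (sizesFrom (-1) (cutsUpTo xs t), lastCut (-1) (cutsUpTo xs t) + 1, (Fm xs t : Int)) := by
  induction t with
  | zero => simp [cutsUpTo, sizesFrom, lastCut, Fm_zero]
  | succ t ih =>
    have htn : t < xs.length := by omega
    have hte : t < (PySem.List.enumerate xs 0).length := by
      rw [PySem.List.length_enumerate]; omega
    rw [List.take_succ_eq_append_getElem hte, List.foldl_append, ih (by omega)]
    rw [PySem.List.getElem_enumerate]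
    simp only [List.foldl_cons, List.foldl_nil]
    have hget : ((PySem.List.enumerate xs 0).foldl
        (fun (d : PySem.Dict Int Int) q => d.insert q.2 q.1) PySem.Dict.empty).getD xs[t] 0 =
        (lstIdx xs xs[t] : Int) := lastDict_getD xs xs[t] (List.getElem_mem htn)
    simp only [hget]
    have hmax : (if (Fm xs t : Int) < (lstIdx xs xs[t] : Int) then (lstIdx xs xs[t] : Int)
        else (Fm xs t : Int)) = (Fm xs (t+1) : Int) := by
      rw [Fm_succ xs t htn]
      split <;> simp <;> omega
    simp only [zero_add, hmax]
    by_cases hcut : cutB xs t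
    · have hc : ((t:Int)) = (Fm xs (t+1) : Int) := by
        have h : Fm xs (t+1) = t := by simpa [cutB] using hcut
        exact_mod_cast h.symm
      rw [cutsUpTo_succ, if_pos hcut, sizesFrom_append, lastCut_append]
      simp only [← hc]
      simp
      ring_nf
    · have hc : ¬ ((t:Int)) = (Fm xs (t+1) : Int) := by
        intro h
        have : Fm xs (t+1) = t := by exact_mod_cast h.symm
        simp [cutB, this] at hcut
      rw [cutsUpTo_succ, if_neg hcut]
      simp [hc]

theorem alt_eq_sizes (xs : List Int) :
    getSubsequences_alt xs = sizesFrom (-1) (cutsUpTo xs xs.length) := by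
  have h := loopB_inv xs xs.length (le_refl _)
  rw [List.take_of_length_le (by rw [PySem.List.length_enumerate])] at h
  rw [getSubsequences_alt]
  simp only [h]

-- ===== A-side: what the shotDict build loop produces =====

theorem build_inv (xs : List Int) :
    (xs.foldl
      (fun (st : PySem.Dict Int (Int × Int × Int) × Int × Int) item =>
        let (d, elem, dictLength) := st
        if d.contains item then
          (d.modify item (0, 0, 0) (fun r => (r.1 + 1, r.2.1, elem)), elem + 1, dictLength)
        else
          (d.insert item (1, elem, elem), elem + 1, dictLength + 1))
      (PySem.Dict.empty, 0, 0)).1.keys = gsL xs ∧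
    (∀ v ∈ xs,
      (xs.foldl
        (fun (st : PySem.Dict Int (Int × Int × Int) × Int × Int) item =>
          let (d, elem, dictLength) := st
          if d.contains item then
            (d.modify item (0, 0, 0) (fun r => (r.1 + 1, r.2.1, elem)), elem + 1, dictLength)
          else
            (d.insert item (1, elem, elem), elem + 1, dictLength + 1))
        (PySem.Dict.empty, 0, 0)).1.getD v (0, 0, 0) =
      ((xs.count v : Int), (fstIdx xs v : Int), (lstIdx xs v : Int))) ∧
    (xs.foldl
      (fun (st : PySem.Dict Int (Int × Int × Int) × Int × Int) item =>
        let (d, elem, dictLength) := st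
        if d.contains item then
          (d.modify item (0, 0, 0) (fun r => (r.1 + 1, r.2.1, elem)), elem + 1, dictLength)
        else
          (d.insert item (1, elem, elem), elem + 1, dictLength + 1))
      (PySem.Dict.empty, 0, 0)).2.1 = (xs.length : Int) ∧
    (xs.foldl
      (fun (st : PySem.Dict Int (Int × Int × Int) × Int × Int) item =>
        let (d, elem, dictLength) := st
        if d.contains item then
          (d.modify item (0, 0, 0) (fun r => (r.1 + 1, r.2.1, elem)), elem + 1, dictLength)
        else
          (d.insert item (1, elem, elem), elem + 1, dictLength + 1))
      (PySem.Dict.empty, 0, 0)).2.2 = (((gsL xs).length : Nat) : Int) := by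
  induction xs using List.reverseRecOn with
  | nil =>
    refine ⟨?_, ?_, ?_, ?_⟩ <;> simp [gsL, PySem.List.dedup, PySem.Set.ofList, PySem.Set.empty, PySem.Dict.keys_empty]
  | append_singleton t x ih =>
    obtain ⟨hkeys, hget, helem, hlen⟩ := ih
    rw [List.foldl_append] at *
    simp only [List.foldl_cons, List.foldl_nil] at *
    set st := t.foldl
      (fun (st : PySem.Dict Int (Int × Int × Int) × Int × Int) item =>
        let (d, elem, dictLength) := st
        if d.contains item then
          (d.modify item (0, 0, 0) (fun r => (r.1 + 1, r.2.1, elem)), elem + 1, dictLength)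
        else
          (d.insert item (1, elem, elem), elem + 1, dictLength + 1))
      (PySem.Dict.empty, 0, 0) with hst
    have hcont : st.1.contains x = decide (x ∈ t) := by
      rw [PySem.Dict.contains_eq_decide_mem_keys, hkeys]
      by_cases hx : x ∈ t <;> simp [hx, mem_gsL]
    by_cases hx : x ∈ t
    · -- x seen before: modify in place
      simp only [hcont, hx, decide_true, if_true]
      refine ⟨?_, ?_, ?_, ?_⟩
      · rw [PySem.Dict.keys_modify,
            PySem.Dict.keys_insert_of_contains _ _ (by rw [hcont]; simp [hx]),
            hkeys, gsL_append, if_pos hx]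
      · intro v hv
        rw [PySem.Dict.getD_modify]
        by_cases hvx : v = x
        · subst hvx
          rw [if_pos rfl, hget v hx]
          simp [List.count_append, fst_append, lst_append, hx, helem]
        · have hvt : v ∈ t := by
            rcases List.mem_append.mp hv with h | h
            · exact h
            · simp at h; exact absurd h hvx
          rw [if_neg hvx, hget v hvt]
          have hxv : ¬ x = v := fun h => hvx h.symm
          simp [List.count_append, fst_append, lst_append, hvt, hxv]
      · simp [helem]
      · rw [hlen, gsL_append, if_pos hx]
    · -- new value: insert at the end
      simp only [hcont, hx, decide_false, Bool.false_eq_true, if_false]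
      refine ⟨?_, ?_, ?_, ?_⟩
      · rw [PySem.Dict.keys_insert_of_not_contains _ _ (by rw [hcont]; simp [hx]),
            hkeys, gsL_append, if_neg hx]
      · intro v hv
        rw [PySem.Dict.getD_insert]
        by_cases hvx : v = x
        · subst hvx
          rw [if_pos rfl]
          have hc0 : t.count v = 0 := List.count_eq_zero.mpr hx
          simp [List.count_append, fst_append, lst_append, hx, helem, hc0]
        · have hvt : v ∈ t := by
            rcases List.mem_append.mp hv with h | h
            · exact h
            · simp at h; exact absurd h hvx
          rw [if_neg hvx, hget v hvt]
          have hxv : ¬ x = v := fun h => hvx h.symm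
          simp [List.count_append, fst_append, lst_append, hvt, hxv]
      · simp [helem]
      · rw [gsL_append, if_neg hx]
        simp [hlen]

-- ===== bridging facts used by the merge-loop invariant =====

theorem gsL_ne_nil (xs : List Int) (h : xs ≠ []) : (gsL xs).length ≥ 1 := by
  have h0 : 0 < xs.length := List.length_pos_iff.mpr h
  have : xs[0] ∈ gsL xs := (mem_gsL xs _).mpr (List.getElem_mem h0)
  have := List.length_pos_iff.mpr (List.ne_nil_of_mem this)
  omega

theorem sB_zero (xs : List Int) (h : xs ≠ []) : sB xs 0 = 0 := by
  have hk := gsL_ne_nil xs h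
  have h0 : 0 < xs.length := List.length_pos_iff.mpr h
  rw [sB, dif_pos (by omega)]
  have hfst0 : fstIdx xs xs[0] = 0 := by
    have := fst_le xs xs[0] 0 h0 rfl
    omega
  have hmem : xs[0] ∈ gsL xs := (mem_gsL xs _).mpr (List.getElem_mem h0)
  rcases List.mem_iff_getElem.mp hmem with ⟨r, hr, he⟩
  rcases Nat.eq_zero_or_pos r with hr0 | hr0
  · subst hr0; rw [he, hfst0]
  · exfalso
    have := gs_fst_mono xs 0 r hr0 hr
    rw [he, hfst0] at this
    omega

theorem noCut_window (xs : List Int) (m i : Nat) (hm : m < (gsL xs).length)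
    (h1 : sB xs m ≤ i) (h2 : i + 1 < sB xs (m + 1)) : cutB xs i = false := by
  have hn : i + 1 < xs.length := by
    have := sB_le xs (m+1)
    omega
  by_contra hb
  have hcut : Fm xs (i+1) = i := by
    simpa [cutB] using Bool.of_not_eq_false hb
  have hfst := cut_first xs i hn hcut
  exact no_first_between xs m (i+1) hm hn (by omega) h2 hfst

theorem maxLst_ne_sBm (xs : List Int) (m : Nat) (hm : m < (gsL xs).length) (hm1 : 1 ≤ m) :
    maxLst xs ((gsL xs).take m) ≠ fstIdx xs ((gsL xs)[m]) := by
  intro heq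
  have hxne : xs ≠ [] := by
    intro h; subst h
    have : (gsL ([] : List Int)).length ≥ 1 := by omega
    simp [gsL, PySem.List.dedup, PySem.Set.ofList, PySem.Set.empty] at this
  have hs1 : 1 ≤ fstIdx xs ((gsL xs)[m]) := by
    have := gs_fst_mono xs 0 m hm1 hm
    have h0 : sB xs 0 = 0 := sB_zero xs hxne
    rw [sB, dif_pos (by omega)] at h0
    omega
  rcases PySem.List.foldl_max_mem (((gsL xs).take m).map (lstIdx xs)) 0 with hc | hc
  · rw [maxLst] at heq
    omega
  · rcases List.mem_map.mp hc with ⟨w, hw, hle⟩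
    rw [maxLst] at heq
    rw [heq] at hle
    have hwgs : w ∈ gsL xs := List.mem_of_mem_take hw
    have hwx : w ∈ xs := (mem_gsL xs w).mp hwgs
    have hgm : (gsL xs)[m] ∈ xs := (mem_gsL xs _).mp (List.getElem_mem hm)
    have hg1 := get_lst xs w hwx
    rw [hle] at hg1
    have hg2 := get_fst xs ((gsL xs)[m]) hgm
    have hweq : w = (gsL xs)[m] := by
      have := hg1.symm.trans hg2
      simpa using this
    rcases List.mem_take_iff_getElem.mp hw with ⟨i, hi, hie⟩
    have hik : i < (gsL xs).length := by simp at hi; omega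
    have : i = m := (List.Nodup.getElem_inj_iff (nodup_gsL xs)).mp (by rw [hie, hweq])
    simp at hi; omega

-- sum of Int-cast counts
theorem sumInt_eq (xs l : List Int) :
    ((l.map (fun v => ((xs.count v : Nat) : Int))).sum) = (((l.map (fun v => xs.count v)).sum : Nat) : Int) := by
  induction l with
  | nil => simp
  | cons v t ih => simp [ih]

theorem foldA_inv (xs : List Int) (hne : xs ≠ []) (m : Nat) (hm1 : 1 ≤ m)
    (hmk : m ≤ (gsL xs).length) :
    ((gsL xs).take m).foldl
      (fun st v =>
        (fun (st : Option Int × Int × List Int) (kv : Int × Int × Int × Int) =>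
          let (prevMax, total, totals) := st
          let currStart := kv.2.2.1
          let currMax := kv.2.2.2
          match prevMax with
          | none => (some currMax, kv.2.1, totals)
          | some pm =>
            if currStart < pm then
              (some (if pm < currMax then currMax else pm), total + kv.2.1, totals)
            else
              (some currMax, kv.2.1, totals ++ [total])) st
          (v, ((xs.count v : Int), (fstIdx xs v : Int), (lstIdx xs v : Int))))
      (none, 0, []) =
    (some ((maxLst xs ((gsL xs).take m) : Nat) : Int),
     (((gsL xs).take m).map (fun v => ((xs.count v : Nat) : Int))).sum -
       (lastCut (-1) (cutsUpTo xs (sB xs m - 1)) + 1),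
     sizesFrom (-1) (cutsUpTo xs (sB xs m - 1))) := by
  induction m, hm1 using Nat.le_induction with
  | base =>
    have hk : 0 < (gsL xs).length := by omega
    have hs0 : sB xs 0 = 0 := sB_zero xs hne
    have hs1 : 0 < sB xs 1 := by
      have h := sB_lt_succ xs 0 hk
      norm_num at h
      omega
    rw [List.take_succ_eq_append_getElem hk]
    simp only [List.take_zero, List.nil_append, List.foldl_cons, List.foldl_nil]
    have hcuts : cutsUpTo xs (sB xs 1 - 1) = [] := by
      have hs01 : sB xs (0+1) = sB xs 1 := by norm_num
      have := cutsUpTo_window xs 0 (sB xs 1 - 1) (by omega)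
        (fun i h0 hi => noCut_window xs 0 i hk (by omega) (by rw [hs01]; omega))
      rw [this, cutsUpTo]
      simp
    rw [hcuts]
    simp [sizesFrom, lastCut, maxLst]
  | succ m hm1 ih =>
    have hmk' : m < (gsL xs).length := by omega
    have hml : m ≤ (gsL xs).length := by omega
    set g := (gsL xs)[m] with hg
    have hgx : g ∈ xs := (mem_gsL xs g).mp (List.getElem_mem hmk')
    have hsm : sB xs m = fstIdx xs g := by rw [sB, dif_pos hmk']
    have hs1 : 1 ≤ sB xs m := by
      have h0 := sB_zero xs hne
      have := sB_mono xs 0 m hm1 (by omega)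
      omega
    have hlt : sB xs m < sB xs (m+1) := sB_lt_succ xs m hmk'
    have hsle : sB xs (m+1) ≤ xs.length := sB_le xs (m+1)
    have hgm := groupMax xs m hml
    rw [List.take_succ_eq_append_getElem hmk', List.foldl_append, ih hml]
    simp only [List.foldl_cons, List.foldl_nil]
    by_cases hc : fstIdx xs g < maxLst xs ((gsL xs).take m)
    · -- merge: this group's range starts inside the running block
      have hcI : ((fstIdx xs g : Nat) : Int) < ((maxLst xs ((gsL xs).take m) : Nat) : Int) := by
        exact_mod_cast hc
      have hcuts : cutsUpTo xs (sB xs (m+1) - 1) = cutsUpTo xs (sB xs m - 1) := by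
        apply cutsUpTo_window xs (sB xs m - 1) (sB xs (m+1) - 1) (by omega)
        intro i hi1 hi2
        rcases Nat.eq_or_lt_of_le hi1 with he | hlt2
        · rw [← he]
          have h1 : sB xs m - 1 + 1 = sB xs m := by omega
          simp [cutB, h1]
          omega
        · exact noCut_window xs m i hmk' (by omega) (by omega)
      rw [maxLst_append, List.map_append, List.sum_append, hcuts, if_pos hcI]
      refine Prod.ext ?_ (Prod.ext ?_ rfl)
      · show some (if ((maxLst xs ((gsL xs).take m) : Nat) : Int) < ((lstIdx xs g : Nat) : Int)
            then ((lstIdx xs g : Nat) : Int) else ((maxLst xs ((gsL xs).take m) : Nat) : Int)) =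
          some ((max (maxLst xs ((gsL xs).take m)) (lstIdx xs g) : Nat) : Int)
        rw [Nat.cast_max]
        congr 1
        split <;> omega
      · show (((gsL xs).take m).map (fun v => ((xs.count v : Nat) : Int))).sum -
            (lastCut (-1) (cutsUpTo xs (sB xs m - 1)) + 1) + ((xs.count g : Nat) : Int) =
          (((gsL xs).take m).map (fun v => ((xs.count v : Nat) : Int))).sum +
            (([g].map (fun v => ((xs.count v : Nat) : Int))).sum) -
            (lastCut (-1) (cutsUpTo xs (sB xs m - 1)) + 1)
        simp
        ring
    · -- split: this group starts a new block at sB m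
      have hub : maxLst xs ((gsL xs).take m) ≤ fstIdx xs g := by omega
      have hne2 : maxLst xs ((gsL xs).take m) ≠ fstIdx xs g := maxLst_ne_sBm xs m hmk' hm1
      have hge : sB xs m - 1 ≤ Fm xs (sB xs m) :=
        Fm_ge xs (sB xs m) (by omega) (by omega)
      have hMeq : maxLst xs ((gsL xs).take m) = sB xs m - 1 := by omega
      have hcut : cutB xs (sB xs m - 1) = true := by
        have h1 : sB xs m - 1 + 1 = sB xs m := by omega
        simp [cutB, h1]
        omega
      have hcuts : cutsUpTo xs (sB xs (m+1) - 1) =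
          cutsUpTo xs (sB xs m - 1) ++ [sB xs m - 1] := by
        apply cutsUpTo_cut xs (sB xs m - 1) (sB xs (m+1) - 1) (by omega) hcut
        intro i hi1 hi2
        exact noCut_window xs m i hmk' (by omega) (by omega)
      have hSm : (((gsL xs).take m).map (fun v => xs.count v)).sum = sB xs m := by
        apply count_take_groups xs m hml
        intro w hw
        have := le_maxLst xs ((gsL xs).take m) w hw
        omega
      have hcI : ¬ (((fstIdx xs g : Nat) : Int) < ((maxLst xs ((gsL xs).take m) : Nat) : Int)) := by
        exact not_lt.mpr (by exact_mod_cast hub)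
      have hfl : fstIdx xs g ≤ lstIdx xs g := fst_le_lst xs g hgx
      have hsum := sumInt_eq xs ((gsL xs).take m)
      rw [maxLst_append, List.map_append, List.sum_append, hcuts, if_neg hcI,
          sizesFrom_append, lastCut_append]
      refine Prod.ext ?_ (Prod.ext ?_ ?_)
      · show some ((lstIdx xs g : Nat) : Int) =
          some ((max (maxLst xs ((gsL xs).take m)) (lstIdx xs g) : Nat) : Int)
        congr 1
        omega
      · show ((xs.count g : Nat) : Int) =
          (((gsL xs).take m).map (fun v => ((xs.count v : Nat) : Int))).sum +
            (([g].map (fun v => ((xs.count v : Nat) : Int))).sum) -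
            (((sB xs m - 1 : Nat) : Int) + 1)
        rw [hsum, hSm]
        have hn1 : (((sB xs m - 1 : Nat)) : Int) = ((sB xs m : Nat) : Int) - 1 := by
          omega
        rw [hn1]
        simp
      · show sizesFrom (-1) (cutsUpTo xs (sB xs m - 1)) ++
            [(((gsL xs).take m).map (fun v => ((xs.count v : Nat) : Int))).sum -
              (lastCut (-1) (cutsUpTo xs (sB xs m - 1)) + 1)] =
          sizesFrom (-1) (cutsUpTo xs (sB xs m - 1)) ++
            [((sB xs m - 1 : Nat) : Int) - lastCut (-1) (cutsUpTo xs (sB xs m - 1))]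
        rw [hsum, hSm]
        congr 2
        have hn1 : (((sB xs m - 1 : Nat)) : Int) = ((sB xs m : Nat) : Int) - 1 := by
          omega
        rw [hn1]
        ring

-- ===== the all-distinct shortcut =====

theorem lst_eq_self (xs : List Int) (hnd : xs.Nodup) (j : Nat) (hj : j < xs.length) :
    lstIdx xs xs[j] = j := by
  have h1 := le_lst xs xs[j] j hj rfl
  have h2 := lst_lt xs xs[j] (List.getElem_mem hj)
  have h3 := get_lst xs xs[j] (List.getElem_mem hj)
  rw [List.getElem?_eq_getElem h2] at h3
  have : lstIdx xs xs[j] = j := by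
    apply (List.Nodup.getElem_inj_iff hnd).mp
    simpa using h3
  exact this

theorem cutsUpTo_all (xs : List Int) (hnd : xs.Nodup) :
    cutsUpTo xs xs.length = List.range xs.length := by
  rw [cutsUpTo]
  apply List.filter_eq_self.mpr
  intro i hi
  have hin : i < xs.length := List.mem_range.mp hi
  have hFm : Fm xs (i+1) = i := by
    apply Nat.le_antisymm
    · apply maxLst_le
      intro v hv
      rcases List.mem_take_iff_getElem.mp hv with ⟨j, hj, he⟩
      have hjn : j < xs.length := by simp at hj; omega
      have hji : j ≤ i := by simp at hj; omega
      rw [← he]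
      rw [lst_eq_self xs hnd j hjn]
      omega
    · have hmem : xs[i] ∈ xs.take (i+1) :=
        List.mem_take_iff_getElem.mpr ⟨i, by omega, rfl⟩
      have := le_maxLst xs (xs.take (i+1)) xs[i] hmem
      rw [lst_eq_self xs hnd i hin] at this
      exact this
  simp [cutB, hFm]

theorem sizes_nodup (xs : List Int) (hnd : xs.Nodup) :
    sizesFrom (-1) (cutsUpTo xs xs.length) = List.replicate xs.length 1 := by
  rw [cutsUpTo_all xs hnd, List.range_eq_range']
  have := sizesFrom_range' xs.length 0
  simpa using this

-- ===== the two ports agree =====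

theorem getSubsequences_eq_alt (xs : List Int) :
    getSubsequences xs = getSubsequences_alt xs := by
  rw [alt_eq_sizes]
  obtain ⟨hkeys, hget, helem, hlen⟩ := build_inv xs
  simp only [getSubsequences]
  rw [hlen]
  by_cases hk : (gsL xs).length = xs.length
  · rw [if_pos (by exact_mod_cast hk)]
    have hgx : gsL xs = xs := (gsL_sublist xs).eq_of_length hk
    have hnd : xs.Nodup := hgx ▸ nodup_gsL xs
    rw [sizes_nodup xs hnd]
  · rw [if_neg (by exact_mod_cast hk)]
    have hne : xs ≠ [] := by
      intro h
      subst h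
      have : gsL ([] : List Int) = [] := rfl
      rw [this] at hk
      exact hk rfl
    have hk1 : 1 ≤ (gsL xs).length := gsL_ne_nil xs hne
    have hn1 : 1 ≤ xs.length := by
      have := List.length_pos_iff.mpr hne
      omega
    -- the dict's items are the distinct values with their (count, first, last) records
    have hnd : (xs.foldl
        (fun (st : PySem.Dict Int (Int × Int × Int) × Int × Int) item =>
          let (d, elem, dictLength) := st
          if d.contains item then
            (d.modify item (0, 0, 0) (fun r => (r.1 + 1, r.2.1, elem)), elem + 1, dictLength)
          else
            (d.insert item (1, elem, elem), elem + 1, dictLength + 1))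
        (PySem.Dict.empty, 0, 0)).1.keys.Nodup := by
      rw [hkeys]; exact nodup_gsL xs
    have hitems : (xs.foldl
        (fun (st : PySem.Dict Int (Int × Int × Int) × Int × Int) item =>
          let (d, elem, dictLength) := st
          if d.contains item then
            (d.modify item (0, 0, 0) (fun r => (r.1 + 1, r.2.1, elem)), elem + 1, dictLength)
          else
            (d.insert item (1, elem, elem), elem + 1, dictLength + 1))
        (PySem.Dict.empty, 0, 0)).1.items =
        (gsL xs).map (fun v => (v, ((xs.count v : Int), (fstIdx xs v : Int), (lstIdx xs v : Int)))) := by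
      rw [PySem.Dict.items_eq_map_keys _ hnd (0, 0, 0), hkeys]
      apply List.map_congr_left
      intro v hv
      rw [hget v ((mem_gsL xs v).mp hv)]
    rw [findIntersections, hitems, List.foldl_map]
    have hfold := foldA_inv xs hne (gsL xs).length hk1 (le_refl _)
    rw [List.take_length] at hfold
    rw [hfold]
    have hsBk : sB xs (gsL xs).length = xs.length := by
      rw [sB, dif_neg (by omega)]
    have hSk : (((gsL xs)).map (fun v => xs.count v)).sum = xs.length := by
      have := count_take_groups xs (gsL xs).length (le_refl _)
        (by
          intro w hw
          rw [hsBk]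
          exact lst_lt xs w ((mem_gsL xs w).mp (List.mem_of_mem_take hw)))
      rw [List.take_length] at this
      rw [this, hsBk]
    have hcutn : cutsUpTo xs xs.length = cutsUpTo xs (xs.length - 1) ++ [xs.length - 1] := by
      apply cutsUpTo_cut xs (xs.length - 1) xs.length (by omega)
      · have := Fm_last xs hn1
        have h1 : xs.length - 1 + 1 = xs.length := by omega
        simp [cutB, h1, this]
      · intro i h1 h2
        omega
    rw [hcutn, sizesFrom_append]
    rw [hsBk]
    have hsum := sumInt_eq xs (gsL xs)
    simp only [hsum, hSk]
    congr 2
    have : ((xs.length - 1 : Nat) : Int) = ((xs.length : Nat) : Int) - 1 := by omega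
    rw [this]
    ring

-- ===== VERDICT (by name: the statement is the Claim_ definition above) =====
theorem getSubsequences_spec : Claim_equal_getSubsequences := by
  intro xs _
  unfold Spec_getSubsequences
  exact getSubsequences_eq_alt xs
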